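-- pv_equiv track=rewrite | github.com/cloverrose/tweepy | tweepy/twitter_utils.py | get_another_size_profile_image_url
-- ===== SOURCE A (Python) =====
-- def get_another_size_profile_image_url(url, variant):
--     """
--     Variant  Dimentions
--     ---------------------
--     normal   48px by 48px
--     bigger   73px by 73px
--     mini     24px by 24px
--     original original
--     """
--     normal = 'normal'
--     bigger = 'bigger'
--     mini = 'mini'
--     original = 'original'
--     if variant not in (normal, bigger, mini, original):
--         raise ValueError('Variant is invalid.')
--
--     idx = url.rfind('.')
--     if idx == -1:
--         # no extension (.jpg, .png)
--         return url
--
--     for suffix in ('_{0}'.format(x) for x in (normal, bigger, mini)):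
--         if url[:idx].endswith(suffix):
--             prefix = url[:idx][:-1 * len(suffix)]
--             if variant == original:
--                 return prefix + url[idx:]
--             else:
--                 return '{0}_{1}{2}'.format(prefix, variant, url[idx:])
--     # url is original-format
--     prefix = url[:idx]
--     if variant == original:
--         return prefix + url[idx:]
--     else:
--         return '{0}_{1}{2}'.format(prefix, variant, url[idx:])
-- ===== SOURCE B (Python) =====
-- def get_another_size_profile_image_url(url, variant):
--     """Rewrite a Twitter profile-image URL to the given size variant.
--
--     Simulates the anchored non-greedy pattern (.*?)(?:_(normal|bigger|mini))?(\\.[^.]*)$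
--     by trying every split point left to right: take the first prefix such that the
--     remainder is an optional size suffix followed by a dot-free extension.
--     """
--     if variant not in ('normal', 'bigger', 'mini', 'original'):
--         raise ValueError('Variant is invalid.')
--     n = len(url)
--     for p in range(n + 1):
--         for suf in ('_normal', '_bigger', '_mini', ''):
--             q = p + len(suf)
--             if url[p:q] == suf and q < n and url[q] == '.' and '.' not in url[q + 1:]:
--                 base, ext = url[:p], url[q:]
--                 return base + ext if variant == 'original' else base + '_' + variant + ext
--     return url
-- ===== Notes on version B (the rewrite author's own statement) =====
-- stated objective: alternative
-- what changed: Replaces rfind index arithmetic plus an endswith-suffix loop with a forward brute-force simulation of the anchored non-greedy pattern (.*?)(?:_(normal|bigger|mini))?(\.[^.]*)$: try each split point left to right and take the first prefix whose remainder is an optional size suffix followed by a dot-free extension.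
import Mathlib
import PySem

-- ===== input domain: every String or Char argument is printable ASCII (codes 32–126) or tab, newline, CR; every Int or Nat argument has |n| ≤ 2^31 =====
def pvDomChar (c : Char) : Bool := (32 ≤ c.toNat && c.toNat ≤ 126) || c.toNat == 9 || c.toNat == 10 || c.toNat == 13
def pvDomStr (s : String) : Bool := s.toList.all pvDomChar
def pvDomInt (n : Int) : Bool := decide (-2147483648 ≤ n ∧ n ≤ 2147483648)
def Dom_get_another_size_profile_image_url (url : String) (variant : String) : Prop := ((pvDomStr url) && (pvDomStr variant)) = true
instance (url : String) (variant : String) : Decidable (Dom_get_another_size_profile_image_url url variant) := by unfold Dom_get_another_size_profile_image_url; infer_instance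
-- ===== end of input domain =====

-- B replaces A's rfind index arithmetic plus endswith-suffix loop by a forward
-- brute-force simulation of the anchored non-greedy pattern
-- (.*?)(?:_(normal|bigger|mini))?(\.[^.]*)$ : try every split point left to right,
-- take the first prefix whose remainder is an optional size suffix followed by a
-- dot-free extension. Return value only; neither version mutates anything.

-- ===== PORT A =====
-- the duplicated tail of A ('prefix + url[idx:]' vs '{0}_{1}{2}'.format(...)), shared verbatim
def pvFmt (pre ext : List Char) (variant : String) : String :=
  if variant = "original" then String.ofList (pre ++ ext)
  else String.ofList (pre ++ ('_' :: variant.toList) ++ ext)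

-- A's 'for suffix in …: if url[:idx].endswith(suffix): …' loop with its early returns
def pvALoop (base ext : List Char) (variant : String) : List (List Char) → String
  | [] => pvFmt base ext variant
  | s :: rest =>
    if PySem.Chars.endswith base s then
      pvFmt (PySem.Chars.slice base none (some (-(s.length : Int)))) ext variant
    else pvALoop base ext variant rest

-- the generator ('_{0}'.format(x) for x in (normal, bigger, mini)), precomputed
def pvSuffixes : List (List Char) :=
  [['_','n','o','r','m','a','l'], ['_','b','i','g','g','e','r'], ['_','m','i','n','i']]

def get_another_size_profile_image_url (url : String) (variant : String) : String :=
  let idx := PySem.Chars.rfind url.toList ['.']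
  if idx = -1 then url
  else pvALoop (PySem.Chars.slice url.toList none (some idx))
               (PySem.Chars.slice url.toList (some idx) none) variant pvSuffixes

-- ===== PORT B =====
-- B's result expression 'base + ext if variant == "original" else base + "_" + variant + ext'
def pvBFmt (base ext : List Char) (variant : String) : String :=
  if variant = "original" then String.ofList (base ++ ext)
  else String.ofList (base ++ '_' :: variant.toList ++ ext)

-- the tuple ('_normal', '_bigger', '_mini', '')
def pvBSuffixes : List (List Char) :=
  [['_','n','o','r','m','a','l'], ['_','b','i','g','g','e','r'], ['_','m','i','n','i'], []]

-- B's inner 'for suf in …' with its early return; the slice/index tests use PySem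
-- (url[q] is guarded by q < n in Source B, so pyGet? = some is exact there)
def pvBInner (u : List Char) (variant : String) (p : Nat) : List (List Char) → Option String
  | [] => none
  | suf :: rest =>
    -- q := p + len(suf), inlined
    if PySem.Chars.slice u (some (p : Int)) (some ((p + suf.length : Nat) : Int)) = suf ∧ p + suf.length < u.length ∧
       PySem.List.pyGet? u ((p + suf.length : Nat) : Int) = some '.' ∧ '.' ∉ PySem.Chars.slice u (some (((p + suf.length : Nat) : Int) + 1)) none
    then some (pvBFmt (PySem.Chars.slice u none (some (p : Int)))
                      (PySem.Chars.slice u (some ((p + suf.length : Nat) : Int)) none) variant)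
    else pvBInner u variant p rest

-- B's outer 'for p in range(n + 1)' with the final 'return url'
def pvBOuter (u : List Char) (variant : String) : List Nat → String
  | [] => String.ofList u
  | p :: ps =>
    match pvBInner u variant p pvBSuffixes with
    | some s => s
    | none => pvBOuter u variant ps

def get_another_size_profile_image_url_alt (url : String) (variant : String) : String :=
  pvBOuter url.toList variant (List.range (url.toList.length + 1))

-- ===== PRECONDITION & SPEC =====
-- A (and B) raise ValueError on any variant other than the four allowed ones; Pre_ excludes exactly those.
def Pre_get_another_size_profile_image_url (url : String) (variant : String) : Prop :=
  variant = "normal" ∨ variant = "bigger" ∨ variant = "mini" ∨ variant = "original"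
instance (url : String) (variant : String) : Decidable (Pre_get_another_size_profile_image_url url variant) := by
  unfold Pre_get_another_size_profile_image_url; infer_instance

def pvWitness_get_another_size_profile_image_url : String × String :=
  ("http://pbs.twimg.com/img_normal.png", "bigger")

def Spec_get_another_size_profile_image_url (url : String) (variant : String) (out : String) : Prop := out = get_another_size_profile_image_url_alt url variant
instance (url : String) (variant : String) (out : String) : Decidable (Spec_get_another_size_profile_image_url url variant out) := by unfold Spec_get_another_size_profile_image_url; infer_instance

-- ===== CLAIM (what is proved, stated in full; the proofs are below) =====
def Claim_equal_get_another_size_profile_image_url : Prop := ∀ (url : String) (variant : String), Dom_get_another_size_profile_image_url url variant → Pre_get_another_size_profile_image_url url variant → Spec_get_another_size_profile_image_url url variant (get_another_size_profile_image_url url variant)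

-- ===== LEMMAS AND PROOFS =====

lemma prefix_single (c : Char) (l : List Char) :
    [c] <+: l ↔ l.head? = some c := by
  cases l with
  | nil => simp
  | cons x xs => simp [List.cons_prefix_cons, eq_comm]

-- characterisation of rfind.go on a one-character needle: the HIGHEST hit at index ≤ k
lemma go_char (b : List Char) (c : Char) : ∀ (k : Nat),
    (PySem.Chars.rfind.go b [c] k = -1 ∧ ∀ m ≤ k, b[m]? ≠ some c) ∨
    (∃ j : Nat, j ≤ k ∧ PySem.Chars.rfind.go b [c] k = (j : Int) ∧ b[j]? = some c ∧
      ∀ m, j < m → m ≤ k → b[m]? ≠ some c) := by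
  intro k
  induction k with
  | zero =>
    by_cases h : b[0]? = some c
    · right
      refine ⟨0, le_refl _, ?_, h, fun m hm hm' => absurd (Nat.lt_of_lt_of_le hm hm') (by omega)⟩
      have : [c] <+: b := (prefix_single c b).mpr (by rw [List.head?_eq_getElem?]; exact h)
      simp [PySem.Chars.rfind.go, this]
    · left
      have : ¬ [c] <+: b := fun hp => h (by
        rw [← List.head?_eq_getElem?]; exact (prefix_single c b).mp hp)
      refine ⟨by simp [PySem.Chars.rfind.go, this], fun m hm => ?_⟩
      interval_cases m; exact h
  | succ k ih =>
    by_cases h : b[k+1]? = some c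
    · right
      refine ⟨k+1, le_refl _, ?_, h, fun m hm hm' => absurd (Nat.lt_of_lt_of_le hm hm') (by omega)⟩
      have : [c] <+: b.drop (k+1) := (prefix_single _ _).mpr (by rw [List.head?_drop]; exact h)
      simp [PySem.Chars.rfind.go, this]
    · have hnp : ¬ [c] <+: b.drop (k+1) := fun hp => h (by
        rw [← List.head?_drop]; exact (prefix_single _ _).mp hp)
      have hgo : PySem.Chars.rfind.go b [c] (k+1) = PySem.Chars.rfind.go b [c] k := by
        simp [PySem.Chars.rfind.go, hnp]
      rcases ih with ⟨h1, h2⟩ | ⟨j, hj, h1, h2, h3⟩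
      · left
        refine ⟨hgo ▸ h1, fun m hm => ?_⟩
        rcases Nat.lt_or_ge m (k+1) with hm' | hm'
        · exact h2 m (by omega)
        · have : m = k+1 := by omega
          subst this; exact h
      · right
        refine ⟨j, by omega, hgo ▸ h1, h2, fun m hmj hm => ?_⟩
        rcases Nat.lt_or_ge m (k+1) with hm' | hm'
        · exact h3 m hmj (by omega)
        · have : m = k+1 := by omega
          subst this; exact h

lemma rfind_neg (b : List Char) (c : Char)
    (h : PySem.Chars.rfind b [c] = -1) : c ∉ b := by
  intro hm
  rcases List.mem_iff_getElem?.mp hm with ⟨m, hm'⟩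
  have hml : m < b.length := (List.getElem?_eq_some_iff.mp hm').1
  rcases go_char b c b.length with ⟨h1, h2⟩ | ⟨j, hj, h1, h2, h3⟩
  · exact h2 m (by omega) hm'
  · rw [PySem.Chars.rfind] at h; rw [h] at h1; omega

lemma rfind_pos (b : List Char) (c : Char)
    (h : PySem.Chars.rfind b [c] ≠ -1) :
    ∃ j : Nat, PySem.Chars.rfind b [c] = (j : Int) ∧ j < b.length ∧
      b[j]? = some c ∧ c ∉ b.drop (j + 1) := by
  rcases go_char b c b.length with ⟨h1, h2⟩ | ⟨j, hj, h1, h2, h3⟩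
  · exact absurd h1 (by rw [PySem.Chars.rfind] at h; exact h)
  · obtain ⟨hjl, hval⟩ := List.getElem?_eq_some_iff.mp h2
    refine ⟨j, h1, hjl, h2, ?_⟩
    intro hmem
    rcases List.mem_iff_getElem?.mp hmem with ⟨m, hm'⟩
    rw [List.getElem?_drop] at hm'
    have : j + 1 + m < b.length := (List.getElem?_eq_some_iff.mp hm').1
    exact h3 (j+1+m) (by omega) (by omega) hm'

-- ==== the last dot: the unique q with u[q] = '.' and no '.' after it ====

lemma dot_unique (u : List Char) (j : Nat)
    (hj : u[j]? = some '.') (hnd : '.' ∉ u.drop (j + 1)) (q : Nat) :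
    (q < u.length ∧ u[q]? = some '.' ∧ '.' ∉ u.drop (q + 1)) ↔ q = j := by
  constructor
  · rintro ⟨hql, hqd, hqn⟩
    by_contra hne
    rcases Nat.lt_or_ge q j with hlt | hge
    · exact hqn (List.mem_iff_getElem?.mpr ⟨j - (q+1), by rw [List.getElem?_drop, show q + 1 + (j - (q+1)) = j by omega]; exact hj⟩)
    · have hqj : j < q := by omega
      exact hnd (List.mem_iff_getElem?.mpr ⟨q - (j+1), by rw [List.getElem?_drop, show j + 1 + (q - (j+1)) = q by omega]; exact hqd⟩)
  · rintro rfl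
    exact ⟨(List.getElem?_eq_some_iff.mp hj).1, hj, hnd⟩

-- endswith on u.take j, rephrased as B's slice condition
lemma endswith_take (u : List Char) (j k : Nat) (hj : j ≤ u.length) (suf : List Char)
    (hk : suf.length = k) :
    PySem.Chars.endswith (u.take j) suf = true ↔ (k ≤ j ∧ (u.drop (j - k)).take k = suf) := by
  rw [PySem.Chars.endswith_iff]
  have hlt : (u.take j).length = j := by simp [List.length_take, Nat.min_eq_left hj]
  constructor
  · intro h
    have hle : k ≤ j := by have := h.length_le; omega
    have heq := List.suffix_iff_eq_drop.mp h
    rw [hlt, hk] at heq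
    rw [List.drop_take] at heq
    refine ⟨hle, ?_⟩
    rw [heq, show j - (j - k) = k by omega]
  · rintro ⟨hle, heq⟩
    rw [List.suffix_iff_eq_drop, hlt, hk, List.drop_take, show j - (j - k) = k by omega, heq]

-- ==== evaluating B's inner loop ====

-- shared context: j is the last-dot position
lemma inner_eval (u : List Char) (v : String) (j : Nat)
    (hj : u[j]? = some '.') (hnd : '.' ∉ u.drop (j + 1)) (p : Nat) :
    pvBInner u v p pvBSuffixes =
      if p + 7 = j ∧ (u.drop p).take 7 = ['_','n','o','r','m','a','l'] then
        some (pvBFmt (u.take p) (u.drop j) v)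
      else if p + 7 = j ∧ (u.drop p).take 7 = ['_','b','i','g','g','e','r'] then
        some (pvBFmt (u.take p) (u.drop j) v)
      else if p + 5 = j ∧ (u.drop p).take 5 = ['_','m','i','n','i'] then
        some (pvBFmt (u.take p) (u.drop j) v)
      else if p = j then some (pvBFmt (u.take p) (u.drop j) v)
      else none := by
  have hjl : j < u.length := (List.getElem?_eq_some_iff.mp hj).1
  have hcond : ∀ q : Nat, (q < u.length ∧ PySem.List.pyGet? u (q : Int) = some '.' ∧
      '.' ∉ PySem.Chars.slice u (some ((q : Int) + 1)) none) ↔ q = j := by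
    intro q
    have h1 : PySem.List.pyGet? u (q : Int) = u[q]? := by simp
    have h2 : PySem.Chars.slice u (some ((q : Int) + 1)) none = u.drop (q + 1) := by
      rw [show ((q : Int) + 1) = ((q + 1 : Nat) : Int) by push_cast; ring,
        PySem.Chars.slice_eq_listSlice, PySem.List.slice_from_natCast]
    rw [h1, h2]; exact dot_unique u j hj hnd q
  have hslice : ∀ p k : Nat, PySem.Chars.slice u (some (p : Int)) (some ((p + k : Nat) : Int)) = (u.drop p).take k := by
    intro p k
    rw [PySem.Chars.slice_eq_listSlice, show ((p + k : Nat) : Int) = ((p : Int) + (k : Int)) by push_cast; ring,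
      PySem.List.slice_natCast_add]
  have hsl0 : PySem.Chars.slice u none (some (p : Int)) = u.take p := by
    simp [PySem.List.slice_to_natCast]
  have hslq : ∀ q : Nat, q = j → PySem.Chars.slice u (some (q : Int)) none = u.drop j := by
    rintro q rfl; simp [PySem.List.slice_from_natCast]
  -- unfold the four suffix branches
  simp only [pvBSuffixes, pvBInner]
  -- branch 1: '_normal'
  by_cases hn : p + 7 = j ∧ (u.drop p).take 7 = ['_','n','o','r','m','a','l']
  · rw [if_pos, if_pos hn]
    · rw [hsl0, hslq _ (by show p + 7 = j; omega)]
    · refine ⟨by rw [show ['_','n','o','r','m','a','l'].length = 7 from rfl, hslice]; exact hn.2, ?_⟩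
      rw [show p + ['_','n','o','r','m','a','l'].length = j from by simpa using hn.1]
      exact (hcond j).mpr rfl
  · rw [if_neg, if_neg hn]
    swap
    · intro hc
      rcases hc with ⟨hs, hrest⟩
      have hq : p + ['_','n','o','r','m','a','l'].length = j := (hcond _).mp hrest
      exact hn ⟨by simpa using hq, by rw [show (7:Nat) = ['_','n','o','r','m','a','l'].length from rfl, ← hslice]; exact hs⟩
    -- branch 2: '_bigger'
    by_cases hb : p + 7 = j ∧ (u.drop p).take 7 = ['_','b','i','g','g','e','r']
    · rw [if_pos, if_pos hb]
      · rw [hsl0, hslq _ (by show p + 7 = j; omega)]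
      · refine ⟨by rw [show ['_','b','i','g','g','e','r'].length = 7 from rfl, hslice]; exact hb.2, ?_⟩
        rw [show p + ['_','b','i','g','g','e','r'].length = j from by simpa using hb.1]
        exact (hcond j).mpr rfl
    · rw [if_neg, if_neg hb]
      swap
      · intro hc
        rcases hc with ⟨hs, hrest⟩
        have hq : p + ['_','b','i','g','g','e','r'].length = j := (hcond _).mp hrest
        exact hb ⟨by simpa using hq, by rw [show (7:Nat) = ['_','b','i','g','g','e','r'].length from rfl, ← hslice]; exact hs⟩
      -- branch 3: '_mini'
      by_cases hm : p + 5 = j ∧ (u.drop p).take 5 = ['_','m','i','n','i']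
      · rw [if_pos, if_pos hm]
        · rw [hsl0, hslq _ (by show p + 5 = j; omega)]
        · refine ⟨by rw [show ['_','m','i','n','i'].length = 5 from rfl, hslice]; exact hm.2, ?_⟩
          rw [show p + ['_','m','i','n','i'].length = j from by simpa using hm.1]
          exact (hcond j).mpr rfl
      · rw [if_neg, if_neg hm]
        swap
        · intro hc
          rcases hc with ⟨hs, hrest⟩
          have hq : p + ['_','m','i','n','i'].length = j := (hcond _).mp hrest
          exact hm ⟨by simpa using hq, by rw [show (5:Nat) = ['_','m','i','n','i'].length from rfl, ← hslice]; exact hs⟩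
        -- branch 4: ''
        by_cases hp : p = j
        · rw [if_pos, if_pos hp]
          · rw [hsl0, hslq _ (by show p + 0 = j; omega), hp]
          · refine ⟨by simp [PySem.List.slice_natCast], ?_⟩
            rw [show p + (List.nil (α := Char)).length = j from by simpa using hp]
            exact (hcond j).mpr rfl
        · rw [if_neg, if_neg hp]
          intro hc
          rcases hc with ⟨hs, hrest⟩
          have hq : p + (List.nil (α := Char)).length = j := (hcond _).mp hrest
          exact hp (by simpa using hq)

-- if no dot exists, B's inner loop never fires
lemma inner_none_of_no_dot (u : List Char) (v : String) (hnd : '.' ∉ u) (p : Nat)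
    (sufs : List (List Char)) : pvBInner u v p sufs = none := by
  induction sufs with
  | nil => rfl
  | cons s rest ih =>
    simp only [pvBInner]
    rw [if_neg, ih]
    rintro ⟨-, -, hget, -⟩
    rw [PySem.List.pyGet?_natCast] at hget
    exact hnd (List.mem_iff_getElem?.mpr ⟨_, hget⟩)

lemma outer_of_no_dot (u : List Char) (v : String) (hnd : '.' ∉ u) (ps : List Nat) :
    pvBOuter u v ps = String.ofList u := by
  induction ps with
  | nil => rfl
  | cons p ps ih => simp only [pvBOuter, inner_none_of_no_dot u v hnd p pvBSuffixes, ih]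

-- B's outer loop returns the inner value at the FIRST succeeding split point
lemma outer_first (u : List Char) (v : String) (pstar : Nat) (s : String)
    (hs : pvBInner u v pstar pvBSuffixes = some s) :
    ∀ (b a : Nat), a ≤ pstar → pstar < a + b →
      (∀ p, a ≤ p → p < pstar → pvBInner u v p pvBSuffixes = none) →
      pvBOuter u v (List.range' a b) = s := by
  intro b
  induction b with
  | zero => intro a h1 h2; omega
  | succ b ih =>
    intro a h1 h2 hnone
    have : List.range' a (b+1) = a :: List.range' (a+1) b := by simp [List.range']
    rw [this]
    by_cases ha : a = pstar
    · subst ha; simp only [pvBOuter, hs]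
    · have hlt : a < pstar := by omega
      simp only [pvBOuter, hnone a (le_refl _) hlt]
      exact ih (a+1) (by omega) (by omega) (fun p hp hp' => hnone p (by omega) hp')

-- A's formatter equals B's (the two expressions build the same string)
lemma fmt_eq (pre ext : List Char) (v : String) : pvFmt pre ext v = pvBFmt pre ext v := by
  simp [pvFmt, pvBFmt]

-- ===== VERDICT (by name: the statement is the Claim_ definition above) =====
theorem get_another_size_profile_image_url_spec : Claim_equal_get_another_size_profile_image_url := by
  intro url variant _ _
  unfold Spec_get_another_size_profile_image_url
  unfold get_another_size_profile_image_url get_another_size_profile_image_url_alt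
  set u := url.toList with hu
  by_cases hneg : PySem.Chars.rfind u ['.'] = -1
  · rw [if_pos hneg, outer_of_no_dot u variant (rfind_neg u '.' hneg), hu]
    exact String.ofList_toList.symm
  · obtain ⟨j, hjv, hjl, hjd, hnd⟩ := rfind_pos u '.' hneg
    have hjle : j ≤ u.length := le_of_lt hjl
    rw [if_neg (by rw [hjv]; omega)]
    have hbase : PySem.Chars.slice u none (some (PySem.Chars.rfind u ['.'])) = u.take j := by
      rw [hjv]; simp [PySem.List.slice_to_natCast]
    have hext : PySem.Chars.slice u (some (PySem.Chars.rfind u ['.'])) none = u.drop j := by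
      rw [hjv]; simp [PySem.List.slice_from_natCast]
    rw [hbase, hext]
    have hrange : List.range (u.length + 1) = List.range' 0 (u.length + 1) := List.range_eq_range'
    have hie := inner_eval u variant j hjd hnd
    -- slice of take: A strips k chars off u.take j
    have hstrip : ∀ k : Nat, 0 < k → k ≤ j →
        PySem.Chars.slice (u.take j) none (some (-(k : Int))) = u.take (j - k) := by
      intro k hk hkj
      have := PySem.List.slice_to_neg_natCast (u.take j) k hk
      simp only [PySem.Chars.slice_eq_listSlice, this, List.length_take, Nat.min_eq_left hjle]
      rw [List.take_take, Nat.min_eq_left (by omega)]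
    have hEn := endswith_take u j 7 hjle ['_','n','o','r','m','a','l'] rfl
    have hEb := endswith_take u j 7 hjle ['_','b','i','g','g','e','r'] rfl
    have hEm := endswith_take u j 5 hjle ['_','m','i','n','i'] rfl
    by_cases hn : 7 ≤ j ∧ (u.drop (j - 7)).take 7 = ['_','n','o','r','m','a','l']
    · -- A strips '_normal'; B's first match is at p = j - 7 with suffix '_normal'
      have hA : pvALoop (u.take j) (u.drop j) variant pvSuffixes
          = pvFmt (u.take (j - 7)) (u.drop j) variant := by
        simp only [pvSuffixes, pvALoop]
        rw [if_pos (hEn.mpr hn), show (['_','n','o','r','m','a','l'] : List Char).length = 7 from rfl,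
          hstrip 7 (by omega) hn.1]
      have hInner : pvBInner u variant (j - 7) pvBSuffixes
          = some (pvBFmt (u.take (j - 7)) (u.drop j) variant) := by
        rw [hie (j - 7), if_pos ⟨by have := hn.1; omega, hn.2⟩]
      rw [hA, hrange, outer_first u variant (j - 7) _ hInner (u.length + 1) 0 (by omega) (by omega) ?_, fmt_eq]
      intro p _ hp
      rw [hie p, if_neg (fun hc => absurd hc.1 (by omega)), if_neg (fun hc => absurd hc.1 (by omega)),
        if_neg (fun hc => absurd hc.1 (by omega)), if_neg (by omega)]
    · have hn' : ¬ PySem.Chars.endswith (u.take j) ['_','n','o','r','m','a','l'] = true := fun h => hn ((hEn.mp h).imp id id)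
      by_cases hb : 7 ≤ j ∧ (u.drop (j - 7)).take 7 = ['_','b','i','g','g','e','r']
      · have hA : pvALoop (u.take j) (u.drop j) variant pvSuffixes
            = pvFmt (u.take (j - 7)) (u.drop j) variant := by
          simp only [pvSuffixes, pvALoop]
          rw [if_neg hn', if_pos (hEb.mpr hb), show (['_','b','i','g','g','e','r'] : List Char).length = 7 from rfl,
            hstrip 7 (by omega) hb.1]
        have hInner : pvBInner u variant (j - 7) pvBSuffixes
            = some (pvBFmt (u.take (j - 7)) (u.drop j) variant) := by
          rw [hie (j - 7),
            if_neg (fun hc => hn ⟨by have := hb.1; omega, hc.2⟩),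
            if_pos ⟨by have := hb.1; omega, hb.2⟩]
        rw [hA, hrange, outer_first u variant (j - 7) _ hInner (u.length + 1) 0 (by omega) (by omega) ?_, fmt_eq]
        intro p _ hp
        rw [hie p, if_neg (fun hc => absurd hc.1 (by omega)), if_neg (fun hc => absurd hc.1 (by omega)),
          if_neg (fun hc => absurd hc.1 (by omega)), if_neg (by omega)]
      · have hb' : ¬ PySem.Chars.endswith (u.take j) ['_','b','i','g','g','e','r'] = true := fun h => hb ((hEb.mp h).imp id id)
        by_cases hm : 5 ≤ j ∧ (u.drop (j - 5)).take 5 = ['_','m','i','n','i']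
        · have hA : pvALoop (u.take j) (u.drop j) variant pvSuffixes
              = pvFmt (u.take (j - 5)) (u.drop j) variant := by
            simp only [pvSuffixes, pvALoop]
            rw [if_neg hn', if_neg hb', if_pos (hEm.mpr hm), show (['_','m','i','n','i'] : List Char).length = 5 from rfl,
              hstrip 5 (by omega) hm.1]
          have hInner : pvBInner u variant (j - 5) pvBSuffixes
              = some (pvBFmt (u.take (j - 5)) (u.drop j) variant) := by
            rw [hie (j - 5), if_neg (fun hc => absurd hc.1 (by have := hm.1; omega)),
              if_neg (fun hc => absurd hc.1 (by have := hm.1; omega)),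
              if_pos ⟨by have := hm.1; omega, hm.2⟩]
          rw [hA, hrange, outer_first u variant (j - 5) _ hInner (u.length + 1) 0 (by omega) (by omega) ?_, fmt_eq]
          intro p _ hp
          -- p < j - 5, with j ≥ 5: possible j - 7 cases must also fail on the slice test
          rw [hie p]
          rw [if_neg (fun hc => hn ⟨by have := hc.1; omega, by rw [show j - 7 = p by have := hc.1; omega]; exact hc.2⟩)]
          rw [if_neg (fun hc => hb ⟨by have := hc.1; omega, by rw [show j - 7 = p by have := hc.1; omega]; exact hc.2⟩)]
          rw [if_neg (by omega), if_neg (by omega)]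
        · have hm' : ¬ PySem.Chars.endswith (u.take j) ['_','m','i','n','i'] = true := fun h => hm ((hEm.mp h).imp id id)
          have hA : pvALoop (u.take j) (u.drop j) variant pvSuffixes
              = pvFmt (u.take j) (u.drop j) variant := by
            simp only [pvSuffixes, pvALoop]
            rw [if_neg hn', if_neg hb', if_neg hm']
          have hInner : pvBInner u variant j pvBSuffixes
              = some (pvBFmt (u.take j) (u.drop j) variant) := by
            rw [hie j, if_neg (fun hc => absurd hc.1 (by omega)),
              if_neg (fun hc => absurd hc.1 (by omega)),
              if_neg (fun hc => absurd hc.1 (by omega)), if_pos rfl]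
          rw [hA, hrange, outer_first u variant j _ hInner (u.length + 1) 0 (by omega) (by omega) ?_, fmt_eq]
          intro p _ hp
          rw [hie p]
          rw [if_neg (fun hc => hn ⟨by have := hc.1; omega, by rw [show j - 7 = p by have := hc.1; omega]; exact hc.2⟩)]
          rw [if_neg (fun hc => hb ⟨by have := hc.1; omega, by rw [show j - 7 = p by have := hc.1; omega]; exact hc.2⟩)]
          rw [if_neg (fun hc => hm ⟨by have := hc.1; omega, by rw [show j - 5 = p by have := hc.1; omega]; exact hc.2⟩)]
          rw [if_neg (by omega)]
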